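-- pv_equiv track=rewrite | github.com/dushyantzz/Deep-Research-AI-Agent | deep_research_agent/agents/drafting_agent.py | format_results_with_citations
-- ===== SOURCE A (Python) =====
-- from typing import Dict, Any, List
--
-- def format_results_with_citations(results: List[Dict[str, Any]]) -> str:
--     if not results:
--         return "No research results found."
--
--     formatted_output = "Based on the research, here's a summary:\n\n"
--     citations = []
--     citation_map = {}
--
--     for i, result in enumerate(results):
--         content = result.get('content', 'N/A')
--         url = result.get('url', 'N/A')
--         title = result.get('title', 'Untitled')
--
--         if url not in citation_map:
--             citation_map[url] = len(citations) + 1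
--             citations.append(f"[{citation_map[url]}] {title} ({url})")
--
--         citation_num = citation_map[url]
--         formatted_output += f"- {content} [{citation_num}]\n"
--
--     formatted_output += "\nSources:\n"
--     formatted_output += "\n".join(citations)
--
--     return formatted_output
-- ===== SOURCE B (Python) =====
-- from typing import Dict, Any, List
--
-- def format_results_with_citations(results: List[Dict[str, Any]]) -> str:
--     if not results:
--         return "No research results found."
--
--     # Number citations by position in the deduplicated url list; no dict needed.
--     urls = [r.get('url', 'N/A') for r in results]
--     order = []
--     for u in urls:
--         if u not in order:
--             order.append(u)
--
--     body = "".join(f"- {r.get('content', 'N/A')} [{order.index(u) + 1}]\n"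
--                    for r, u in zip(results, urls))
--     sources = "\n".join(
--         f"[{i + 1}] "
--         f"{next(r for r in results if r.get('url', 'N/A') == u).get('title', 'Untitled')}"
--         f" ({u})"
--         for i, u in enumerate(order))
--     return "Based on the research, here's a summary:\n\n" + body + "\nSources:\n" + sources
-- ===== Notes on version B (the rewrite author's own statement) =====
-- stated objective: alternative
-- what changed: A threads a url->number dict, a citations list and the output string through one loop; B keeps no dict at all: it numbers each line by the position of its url in the deduplicated url list (order.index) and rebuilds each source line's title by searching results for the first record with that url.
import Mathlib
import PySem

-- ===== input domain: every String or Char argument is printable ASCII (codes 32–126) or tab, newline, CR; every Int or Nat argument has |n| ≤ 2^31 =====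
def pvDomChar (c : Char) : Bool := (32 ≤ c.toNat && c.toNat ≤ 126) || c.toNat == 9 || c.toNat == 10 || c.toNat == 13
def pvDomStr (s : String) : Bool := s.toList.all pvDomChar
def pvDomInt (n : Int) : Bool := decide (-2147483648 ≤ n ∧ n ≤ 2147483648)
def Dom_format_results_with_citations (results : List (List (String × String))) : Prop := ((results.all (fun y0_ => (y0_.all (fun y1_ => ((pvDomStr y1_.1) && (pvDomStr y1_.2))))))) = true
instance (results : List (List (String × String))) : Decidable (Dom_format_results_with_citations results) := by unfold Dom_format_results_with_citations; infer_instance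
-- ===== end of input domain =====

-- B drops A's url->number dict entirely: it numbers lines by the url's position in the
-- deduplicated url list and recovers titles by first-occurrence search (objective: alternative).


-- ===== PORT A =====
-- result.get(k, dflt): first-match lookup in the association list (exact for a Python dict)
def pvGet (r : List (String × String)) (k dflt : String) : String :=
  match r.find? (fun p => p.1 == k) with
  | some p => p.2
  | none => dflt

-- loop body of A: state = (formatted_output, citations, citation_map)
def pvStepA (st : String × List String × PySem.Dict String Int)
    (result : List (String × String)) : String × List String × PySem.Dict String Int :=
  let content := pvGet result "content" "N/A"
  let url := pvGet result "url" "N/A"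
  let title := pvGet result "title" "Untitled"
  if st.2.2.contains url then
    (st.1 ++ "- " ++ content ++ " [" ++ PySem.Int.toStr (st.2.2.getD url 0) ++ "]\n",
     st.2.1, st.2.2)
  else
    let cmap := st.2.2.insert url (PySem.List.len st.2.1 + 1)
    (st.1 ++ "- " ++ content ++ " [" ++ PySem.Int.toStr (cmap.getD url 0) ++ "]\n",
     st.2.1 ++ ["[" ++ PySem.Int.toStr (cmap.getD url 0) ++ "] " ++ title ++ " (" ++ url ++ ")"],
     cmap)

def format_results_with_citations (results : List (List (String × String))) : String :=
  match results with
  | [] => "No research results found."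
  | _ =>
    let st := results.foldl pvStepA
      ("Based on the research, here's a summary:\n\n", [], PySem.Dict.empty)
    st.1 ++ "\nSources:\n" ++ PySem.Str.join "\n" st.2.1

-- ===== PORT B =====
def format_results_with_citations_alt (results : List (List (String × String))) : String :=
  if results.isEmpty then "No research results found."
  else
    let urls := results.map (fun r => pvGet r "url" "N/A")
    -- 'if u not in order: order.append(u)' is exactly PySem.Set.add
    let order := urls.foldl PySem.Set.add ([] : PySem.Set String)
    let body := String.join ((results.zip urls).map (fun p =>
      "- " ++ pvGet p.1 "content" "N/A" ++ " ["
        ++ PySem.Int.toStr (((PySem.List.index? order p.2).getD 0 : Int) + 1) ++ "]\n"))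
    let sources := PySem.Str.join "\n" ((PySem.List.enumerate order).map (fun q =>
      "[" ++ PySem.Int.toStr (q.1 + 1) ++ "] "
        ++ pvGet ((results.find? (fun r => pvGet r "url" "N/A" == q.2)).getD []) "title" "Untitled"
        ++ " (" ++ q.2 ++ ")"))
    "Based on the research, here's a summary:\n\n" ++ body ++ "\nSources:\n" ++ sources

-- ===== PRECONDITION & SPEC =====
def Spec_format_results_with_citations (results : List (List (String × String))) (out : String) : Prop := out = format_results_with_citations_alt results
instance (results : List (List (String × String))) (out : String) : Decidable (Spec_format_results_with_citations results out) := by unfold Spec_format_results_with_citations; infer_instance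

-- ===== CLAIM (what is proved, stated in full; the proofs are below) =====
def Claim_equal_format_results_with_citations : Prop := ∀ (results : List (List (String × String))), Dom_format_results_with_citations results → Spec_format_results_with_citations results (format_results_with_citations results)

-- ===== LEMMAS AND PROOFS =====
-- abstract "seen" list of (url, first title) pairs in first-appearance order
def pvUrl (r : List (String × String)) : String := pvGet r "url" "N/A"

def pvSeenStep (s : List (String × String)) (r : List (String × String)) :
    List (String × String) :=
  if (s.map Prod.fst).contains (pvUrl r) then s
  else s ++ [(pvUrl r, pvGet r "title" "Untitled")]

-- citation number a seen-list assigns to a url (0 = unseen, never used)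
def pvNum (s : List (String × String)) (u : String) : Int :=
  match PySem.List.index? (s.map Prod.fst) u with
  | some i => (i : Int) + 1
  | none => 0

def pvCites (s : List (String × String)) : List String :=
  (PySem.List.enumerate s).map (fun q =>
    "[" ++ PySem.Int.toStr (q.1 + 1) ++ "] " ++ q.2.2 ++ " (" ++ q.2.1 ++ ")")

-- A's dict agrees with the seen-list numbering
def pvInv (m : PySem.Dict String Int) (s : List (String × String)) : Prop :=
  (∀ u, m.getD u 0 = pvNum s u) ∧ (∀ u, m.contains u = (s.map Prod.fst).contains u)


-- String.join over a cons (A's '+=' loop vs B's join)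
theorem pv_foldl_append_shift : ∀ (l : List String) (a : String),
    l.foldl (· ++ ·) a = a ++ l.foldl (· ++ ·) "" := by
  intro l
  induction l with
  | nil => intro a; simp
  | cons y ys ih =>
    intro a
    simp only [List.foldl_cons]
    rw [ih ("" ++ y), ih (a ++ y)]
    simp [String.append_assoc]

theorem pv_join_cons (x : String) (xs : List String) :
    String.join (x :: xs) = x ++ String.join xs := by
  simp only [String.join, List.foldl_cons]
  rw [pv_foldl_append_shift xs ("" ++ x)]
  simp

-- the seen-list only grows by appending
theorem pv_seen_append : ∀ (rs : List (List (String × String)))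
    (s : List (String × String)), ∃ t, rs.foldl pvSeenStep s = s ++ t := by
  intro rs
  induction rs with
  | nil => intro s; exact ⟨[], by simp⟩
  | cons r rs ih =>
    intro s
    simp only [List.foldl_cons, pvSeenStep]
    by_cases hc : ((s.map Prod.fst).contains (pvUrl r)) = true
    · rw [if_pos hc]; exact ih s
    · rw [if_neg hc]
      obtain ⟨t, ht⟩ := ih (s ++ [(pvUrl r, pvGet r "title" "Untitled")])
      exact ⟨(pvUrl r, pvGet r "title" "Untitled") :: t, by simpa using ht⟩

-- a url already numbered keeps its number
theorem pv_num_mono (rs : List (List (String × String)))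
    (s : List (String × String)) (u : String) (h : u ∈ s.map Prod.fst) :
    pvNum (rs.foldl pvSeenStep s) u = pvNum s u := by
  obtain ⟨t, ht⟩ := pv_seen_append rs s
  rw [ht]
  unfold pvNum
  rw [List.map_append, PySem.List.index?_append_of_mem _ h]

-- the main invariant: A's fold = header ++ body lines (numbered by the FINAL
-- seen-list) / citations of the final seen-list / a dict still in pvInv
theorem pv_main : ∀ (rs : List (List (String × String))) (out : String)
    (s : List (String × String)) (m : PySem.Dict String Int), pvInv m s →
    ∃ m', rs.foldl pvStepA (out, pvCites s, m) =
      (out ++ String.join (rs.map (fun r =>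
         "- " ++ pvGet r "content" "N/A" ++ " ["
           ++ PySem.Int.toStr (pvNum (rs.foldl pvSeenStep s) (pvUrl r)) ++ "]\n")),
       pvCites (rs.foldl pvSeenStep s), m') ∧ pvInv m' (rs.foldl pvSeenStep s) := by
  intro rs
  induction rs with
  | nil => intro out s m hm; exact ⟨m, by simp [String.join], hm⟩
  | cons r rs ih =>
    intro out s m hm
    have hcont := hm.2 (pvUrl r)
    by_cases hc : ((s.map Prod.fst).contains (pvUrl r)) = true
    · -- url already numbered: state unchanged apart from the output line
      have hs' : pvSeenStep s r = s := by
        unfold pvSeenStep; rw [if_pos hc]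
      have hmc : m.contains (pvGet r "url" "N/A") = true := by
        rw [show pvGet r "url" "N/A" = pvUrl r from rfl, hcont]; exact hc
      have hstep : pvStepA (out, pvCites s, m) r =
          (out ++ "- " ++ pvGet r "content" "N/A" ++ " ["
             ++ PySem.Int.toStr (pvNum s (pvUrl r)) ++ "]\n", pvCites s, m) := by
        unfold pvStepA
        rw [if_pos hmc, show m.getD (pvGet r "url" "N/A") 0 = pvNum s (pvUrl r) from hm.1 (pvUrl r)]
      obtain ⟨m', heq, hm'⟩ := ih (out ++ "- " ++ pvGet r "content" "N/A" ++ " ["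
             ++ PySem.Int.toStr (pvNum s (pvUrl r)) ++ "]\n") s m hm
      refine ⟨m', ?_, ?_⟩
      · simp only [List.foldl_cons, hstep, hs', heq, List.map_cons, pv_join_cons]
        rw [pv_num_mono rs s (pvUrl r) (List.mem_of_elem_eq_true hc)]
        simp [String.append_assoc]
      · simpa [hs'] using hm'
    · -- fresh url
      have hcf : ((s.map Prod.fst).contains (pvUrl r)) = false := by
        simpa using hc
      have hnm : pvUrl r ∉ s.map Prod.fst := by
        simpa [List.contains_iff_mem] using hc
      have hs' : pvSeenStep s r = s ++ [(pvUrl r, pvGet r "title" "Untitled")] := by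
        unfold pvSeenStep; rw [if_neg (by rw [hcf]; simp)]
      have hlen : PySem.List.len (pvCites s) = (s.length : Int) := by
        simp [pvCites, PySem.List.len_eq, PySem.List.length_enumerate]
      have hnum' : pvNum (s ++ [(pvUrl r, pvGet r "title" "Untitled")]) (pvUrl r)
          = (s.length : Int) + 1 := by
        unfold pvNum
        rw [List.map_append]
        simp only [List.map_cons, List.map_nil]
        rw [PySem.List.index?_append_singleton_self (List.map Prod.fst s) (pvUrl r) hnm]
        simp
      have hinv' : pvInv (m.insert (pvUrl r) (PySem.List.len (pvCites s) + 1))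
          (s ++ [(pvUrl r, pvGet r "title" "Untitled")]) := by
        constructor
        · intro u'
          by_cases he : u' = pvUrl r
          · subst he
            rw [PySem.Dict.getD_insert_self, hnum', hlen]
          · rw [PySem.Dict.getD_insert_of_ne _ _ _ he, hm.1 u']
            unfold pvNum
            rw [List.map_append]
            simp only [List.map_cons, List.map_nil]
            by_cases hmem : u' ∈ s.map Prod.fst
            · rw [PySem.List.index?_append_of_mem _ hmem]
            · rw [(PySem.List.index?_eq_none_iff _ _).2 hmem,
                  (PySem.List.index?_eq_none_iff _ _).2 (by simp [hmem, he])]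
        · intro u'
          rw [PySem.Dict.contains_insert, hm.2 u', List.map_append]
          simp only [List.map_cons, List.map_nil]
          by_cases he : u' = pvUrl r
          · simp [he]
          · simp [beq_eq_false_iff_ne.2 he, he, List.mem_append]
      have hgd : (m.insert (pvUrl r) (PySem.List.len (pvCites s) + 1)).getD (pvUrl r) 0
          = (s.length : Int) + 1 := by
        rw [PySem.Dict.getD_insert_self, hlen]
      have hmc : m.contains (pvGet r "url" "N/A") = false := by
        rw [show pvGet r "url" "N/A" = pvUrl r from rfl, hm.2 (pvUrl r)]; exact hcf
      have hcites : pvCites s ++ ["[" ++ PySem.Int.toStr ((s.length : Int) + 1) ++ "] "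
            ++ pvGet r "title" "Untitled" ++ " (" ++ pvUrl r ++ ")"]
          = pvCites (s ++ [(pvUrl r, pvGet r "title" "Untitled")]) := by
        simp [pvCites, PySem.List.enumerate_append, PySem.List.enumerate_cons,
              PySem.List.enumerate_nil]
      have hstep : pvStepA (out, pvCites s, m) r =
          (out ++ "- " ++ pvGet r "content" "N/A" ++ " ["
             ++ PySem.Int.toStr ((s.length : Int) + 1) ++ "]\n",
           pvCites (s ++ [(pvUrl r, pvGet r "title" "Untitled")]),
           m.insert (pvUrl r) (PySem.List.len (pvCites s) + 1)) := by
        dsimp only [pvStepA]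
        rw [if_neg (by rw [hmc]; simp)]
        rw [show pvGet r "url" "N/A" = pvUrl r from rfl, hgd, ← hcites]
      obtain ⟨m', heq, hm'⟩ := ih (out ++ "- " ++ pvGet r "content" "N/A" ++ " ["
             ++ PySem.Int.toStr ((s.length : Int) + 1) ++ "]\n")
             (s ++ [(pvUrl r, pvGet r "title" "Untitled")]) _ hinv'
      refine ⟨m', ?_, ?_⟩
      · simp only [List.foldl_cons, hstep, hs', heq, List.map_cons, pv_join_cons]
        rw [pv_num_mono rs (s ++ [(pvUrl r, pvGet r "title" "Untitled")]) (pvUrl r) (by simp),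
            hnum']
        simp [String.append_assoc]
      · simpa [hs'] using hm'

-- the urls of the seen-list are exactly the set-dedup of the url list
theorem pv_map_fst_seen : ∀ (rs : List (List (String × String)))
    (s : List (String × String)),
    (rs.foldl pvSeenStep s).map Prod.fst
      = (rs.map pvUrl).foldl PySem.Set.add (s.map Prod.fst) := by
  intro rs
  induction rs with
  | nil => intro s; simp
  | cons r rs ih =>
    intro s
    simp only [List.foldl_cons, List.map_cons]
    rw [ih (pvSeenStep s r)]
    congr 1
    unfold pvSeenStep
    by_cases hc : ((s.map Prod.fst).contains (pvUrl r)) = true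
    · rw [if_pos hc, PySem.Set.add_of_mem (List.mem_of_elem_eq_true hc)]
    · rw [if_neg hc, List.map_append,
          PySem.Set.add_of_not_mem (fun hmem => hc (List.elem_eq_true_of_mem hmem))]
      simp

-- titles in the seen-list come from the FIRST result with that url
theorem pv_title : ∀ (rs : List (List (String × String)))
    (s : List (String × String)) (u t : String),
    (u, t) ∈ rs.foldl pvSeenStep s → (u, t) ∈ s ∨
      (u ∉ s.map Prod.fst ∧ ∃ r₀, rs.find? (fun r => pvUrl r == u) = some r₀ ∧
        pvGet r₀ "title" "Untitled" = t) := by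
  intro rs
  induction rs with
  | nil => intro s u t h; exact Or.inl (by simpa using h)
  | cons r rs ih =>
    intro s u t h
    simp only [List.foldl_cons, pvSeenStep] at h
    by_cases hc : ((s.map Prod.fst).contains (pvUrl r)) = true
    · rw [if_pos hc] at h
      rcases ih s u t h with h1 | ⟨h2, r₀, hf, ht⟩
      · exact Or.inl h1
      · have hne : pvUrl r ≠ u := by
          intro he
          exact h2 (he ▸ List.mem_of_elem_eq_true hc)
        refine Or.inr ⟨h2, r₀, ?_, ht⟩
        rw [List.find?_cons_of_neg (by simp [hne]), hf]
    · rw [if_neg (by simpa using hc)] at h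
      have hnm : pvUrl r ∉ s.map Prod.fst := by
        simpa [List.contains_iff_mem] using hc
      rcases ih _ u t h with h1 | ⟨h2, r₀, hf, ht⟩
      · rcases List.mem_append.1 h1 with h1 | h1
        · exact Or.inl h1
        · simp only [List.mem_singleton, Prod.mk.injEq] at h1
          refine Or.inr ⟨h1.1 ▸ hnm, r, ?_, h1.2.symm⟩
          rw [List.find?_cons_of_pos (by simp [h1.1])]
      · have hne : pvUrl r ≠ u := by
          intro he
          exact (h2 (by simp [he])).elim
        have h2' : u ∉ s.map Prod.fst := fun hx => h2 (by simp [hx])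
        refine Or.inr ⟨h2', r₀, ?_, ht⟩
        rw [List.find?_cons_of_neg (by simp [hne]), hf]

-- enumerate commutes with map fst
theorem pv_enumerate_map : ∀ (l : List (String × String)) (k : Int),
    PySem.List.enumerate (l.map Prod.fst) k
      = (PySem.List.enumerate l k).map (fun q => (q.1, q.2.1)) := by
  intro l
  induction l with
  | nil => intro k; simp [PySem.List.enumerate_nil]
  | cons x xs ih =>
    intro k
    simp [PySem.List.enumerate_cons, ih]

-- ===== VERDICT (by name: the statement is the Claim_ definition above) =====
theorem format_results_with_citations_spec : Claim_equal_format_results_with_citations := by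
  intro results _
  unfold Spec_format_results_with_citations
  match results with
  | [] => rfl
  | r :: rs =>
    simp only [format_results_with_citations, format_results_with_citations_alt,
      List.isEmpty_cons, Bool.false_eq_true, if_neg, not_false_iff]
    obtain ⟨m', heq, _⟩ := pv_main (r :: rs)
      "Based on the research, here's a summary:\n\n" [] PySem.Dict.empty
      ⟨fun u => by simp [pvNum, PySem.Dict.getD_empty, PySem.List.index?_eq_idxOf?],
       fun u => by simp [PySem.Dict.contains_empty]⟩
    rw [show pvCites ([] : List (String × String)) = [] from rfl] at heq
    rw [heq]
    -- name the final seen-list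
    set S := (r :: rs).foldl pvSeenStep [] with hS
    have horder : ((r :: rs).map (fun x => pvGet x "url" "N/A")).foldl PySem.Set.add
        ([] : PySem.Set String) = S.map Prod.fst := by
      rw [pv_map_fst_seen (r :: rs) []]
      simp only [List.map_nil]
      rfl
    rw [← List.map_prod_left_eq_zip, List.map_map, horder]
    -- body lines agree
    have hbody : ∀ x ∈ (r :: rs),
        "- " ++ pvGet x "content" "N/A" ++ " ["
          ++ PySem.Int.toStr (((PySem.List.index? (S.map Prod.fst) (pvGet x "url" "N/A")).getD 0 : Int) + 1)
          ++ "]\n"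
        = "- " ++ pvGet x "content" "N/A" ++ " ["
          ++ PySem.Int.toStr (pvNum S (pvUrl x)) ++ "]\n" := by
      intro x hx
      have hmem : pvUrl x ∈ S.map Prod.fst := by
        rw [pv_map_fst_seen (r :: rs) []]
        simp only [List.map_nil]
        have : pvUrl x ∈ (r :: rs).map pvUrl := List.mem_map_of_mem hx
        rw [show ((r :: rs).map pvUrl).foldl PySem.Set.add ([] : PySem.Set String)
              = PySem.Set.ofList ((r :: rs).map pvUrl) from rfl]
        simpa [PySem.Set.mem_ofList] using this
      obtain ⟨i, hi⟩ : ∃ i, PySem.List.index? (S.map Prod.fst) (pvUrl x) = some i := by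
        have := (PySem.List.index?_isSome_iff (S.map Prod.fst) (pvUrl x)).2 hmem
        exact Option.isSome_iff_exists.mp this
      simp only [pvNum, pvUrl] at *
      rw [hi]
      simp
    simp only [Function.comp_def]
    rw [List.map_congr_left hbody]
    -- source lines agree
    have hsrc : (PySem.List.enumerate (S.map Prod.fst)).map (fun q =>
        "[" ++ PySem.Int.toStr (q.1 + 1) ++ "] "
          ++ pvGet (((r :: rs).find? (fun x => pvGet x "url" "N/A" == q.2)).getD []) "title" "Untitled"
          ++ " (" ++ q.2 ++ ")") = pvCites S := by
      rw [pv_enumerate_map, List.map_map]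
      unfold pvCites
      apply List.map_congr_left
      intro q hq
      have hqS : q.2 ∈ S := by
        obtain ⟨k, hk, hqe⟩ := (PySem.List.mem_enumerate_iff _ _ _).1 hq
        subst hqe
        exact List.getElem_mem hk
      have := pv_title (r :: rs) [] q.2.1 q.2.2 (by simpa using hqS)
      rcases this with h1 | ⟨_, r₀, hf, ht⟩
      · simp at h1
      · simp only [pvUrl] at hf
        simp [hf, ht]
    rw [hsrc]
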